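-- pv_equiv track=rewrite | github.com/Munikumar09/tailor | backend/resume_tailor/tailor.py | _rank_blocks_by_relevance
-- ===== SOURCE A (Python) =====
-- _BLOCK_PREFILTER_TOP_N = 15
--
-- def _rank_blocks_by_relevance(
--     tailorable: list[dict],
--     missing_keywords: list[str],
--     top_n: int = _BLOCK_PREFILTER_TOP_N,
-- ) -> list[dict]:
--     """
--     Score each block by how many missing keyword tokens it shares
--     with its existing text (the LLM should be fixing gaps, so blocks
--     already close to the keywords are the highest-value targets).
--
--     Also includes blocks with zero overlap if we don't have enough
--     candidates — ensures we never send fewer than min(top_n, len(tailorable)).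
--     """
--     if not missing_keywords:
--         # No gap data — send all tailorable blocks up to top_n
--         return tailorable[:top_n]
--
--     # Build a flat set of individual tokens from missing keywords
--     missing_tokens: set[str] = set()
--     for kw in missing_keywords:
--         missing_tokens.update(kw.lower().split())
--
--     scored: list[tuple[int, dict]] = []
--     for block in tailorable:
--         block_tokens = set(block["fullText"].lower().split())
--         # Score = number of missing keyword tokens present in block text
--         # Higher = block is already on-topic and just needs the exact term
--         score = len(block_tokens & missing_tokens)
--         scored.append((score, block))
--
--     # Sort descending by score, preserve original order for ties
--     scored.sort(key=lambda x: x[0], reverse=True)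
--     return [block for _, block in scored[:top_n]]
-- ===== SOURCE B (Python) =====
-- _BLOCK_PREFILTER_TOP_N = 15
--
-- def _rank_blocks_by_relevance(
--     tailorable: list[dict],
--     missing_keywords: list[str],
--     top_n: int = _BLOCK_PREFILTER_TOP_N,
-- ) -> list[dict]:
--     if not missing_keywords:
--         return tailorable[:top_n]
--
--     missing_tokens: set[str] = set()
--     for kw in missing_keywords:
--         missing_tokens.update(kw.lower().split())
--
--     # Bucket blocks by score instead of sorting: buckets[score] keeps
--     # original order, so reading buckets from max_score down to 0
--     # reproduces the stable descending order.
--     buckets: dict[int, list[dict]] = {}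
--     max_score = 0
--     for block in tailorable:
--         score = len(set(block["fullText"].lower().split()) & missing_tokens)
--         buckets.setdefault(score, []).append(block)
--         if score > max_score:
--             max_score = score
--
--     result: list[dict] = []
--     for s in range(max_score, -1, -1):
--         result.extend(buckets.get(s, []))
--     return result[:top_n]
-- ===== Notes on version B (the rewrite author's own statement) =====
-- stated objective: alternative
-- what changed: Replaces the stable descending comparison sort of (score, block) pairs by bucketing blocks per score in a dict and reading the buckets out from the max score down to 0 (a counting/bucket sort that preserves the stable tie order).
import Mathlib
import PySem

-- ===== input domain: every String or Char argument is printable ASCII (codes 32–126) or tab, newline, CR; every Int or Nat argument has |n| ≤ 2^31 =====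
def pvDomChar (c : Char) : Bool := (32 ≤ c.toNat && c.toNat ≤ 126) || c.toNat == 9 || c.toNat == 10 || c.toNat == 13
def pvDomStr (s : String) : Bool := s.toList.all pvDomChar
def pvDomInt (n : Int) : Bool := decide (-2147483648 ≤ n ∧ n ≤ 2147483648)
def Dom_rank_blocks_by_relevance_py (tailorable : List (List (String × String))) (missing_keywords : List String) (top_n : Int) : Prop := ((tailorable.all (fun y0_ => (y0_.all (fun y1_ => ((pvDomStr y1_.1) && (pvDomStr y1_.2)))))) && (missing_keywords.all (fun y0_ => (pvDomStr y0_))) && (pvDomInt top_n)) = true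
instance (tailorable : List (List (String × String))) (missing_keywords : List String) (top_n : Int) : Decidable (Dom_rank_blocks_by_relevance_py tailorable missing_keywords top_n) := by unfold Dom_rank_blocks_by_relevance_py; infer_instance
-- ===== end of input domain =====

-- B replaces the stable descending comparison sort of A by score buckets read out
-- from the maximal score down to zero (a counting/bucket sort); same return value.


-- ===== PORT A =====
-- shared by both ports: the token set of the missing keywords ('missing_tokens')
def pvMissingTokens (missing_keywords : List String) : PySem.Set String :=
  missing_keywords.foldl (fun s kw => PySem.Set.update s (PySem.Str.split₀ (PySem.Str.lower kw))) PySem.Set.empty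

-- shared by both ports: len(set(block["fullText"].lower().split()) & missing_tokens)
-- (total via getD ""; Pre_ excludes the KeyError inputs where Python would raise)
def pvScore (missing_tokens : PySem.Set String) (block : List (String × String)) : Int :=
  PySem.Set.len (PySem.Set.inter
    (PySem.Set.ofList (PySem.Str.split₀ (PySem.Str.lower ((PySem.Dict.mk block).getD "fullText" ""))))
    missing_tokens)

def rank_blocks_by_relevance_py (tailorable : List (List (String × String))) (missing_keywords : List String) (top_n : Int) : List (List (String × String)) :=
  if missing_keywords = [] then PySem.List.slice tailorable none (some top_n)
  else
    let missing_tokens := pvMissingTokens missing_keywords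
    let scored : List (Int × List (String × String)) :=
      tailorable.foldl (fun acc block => acc ++ [(pvScore missing_tokens block, block)]) []
    let scored := PySem.List.sorted scored (fun x => x.1) true
    (PySem.List.slice scored none (some top_n)).map (fun x => x.2)

-- ===== PORT B =====
def rank_blocks_by_relevance_py_alt (tailorable : List (List (String × String))) (missing_keywords : List String) (top_n : Int) : List (List (String × String)) :=
  if missing_keywords = [] then PySem.List.slice tailorable none (some top_n)
  else
    let missing_tokens := pvMissingTokens missing_keywords
    let bm :=
      tailorable.foldl
        (fun (p : PySem.Dict Int (List (List (String × String))) × Int) block =>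
          let score := pvScore missing_tokens block
          (p.1.insert score ((p.1.getD score []) ++ [block]),
           if score > p.2 then score else p.2))
        (PySem.Dict.mk [], 0)
    let result :=
      (PySem.List.pyRange bm.2 (-1) (-1)).foldl (fun acc s => acc ++ bm.1.getD s []) []
    PySem.List.slice result none (some top_n)

-- ===== PRECONDITION & SPEC =====
-- Pre_ excludes exactly the inputs where A raises KeyError: a nonempty missing_keywords
-- together with some block lacking the "fullText" key.
def Pre_rank_blocks_by_relevance_py (tailorable : List (List (String × String))) (missing_keywords : List String) (top_n : Int) : Prop :=
  missing_keywords = [] ∨ ∀ b ∈ tailorable, ((PySem.Dict.mk b).get? "fullText").isSome = true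
instance (tailorable : List (List (String × String))) (missing_keywords : List String) (top_n : Int) : Decidable (Pre_rank_blocks_by_relevance_py tailorable missing_keywords top_n) := by unfold Pre_rank_blocks_by_relevance_py; infer_instance

def pvWitness_rank_blocks_by_relevance_py : (List (List (String × String))) × List String × Int :=
  ([[("fullText", "foo bar")], [("fullText", "baz")]], ["bar baz"], 2)

def Spec_rank_blocks_by_relevance_py (tailorable : List (List (String × String))) (missing_keywords : List String) (top_n : Int) (out : List (List (String × String))) : Prop := out = rank_blocks_by_relevance_py_alt tailorable missing_keywords top_n
instance (tailorable : List (List (String × String))) (missing_keywords : List String) (top_n : Int) (out : List (List (String × String))) : Decidable (Spec_rank_blocks_by_relevance_py tailorable missing_keywords top_n out) := by unfold Spec_rank_blocks_by_relevance_py; infer_instance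

-- ===== CLAIM (what is proved, stated in full; the proofs are below) =====
def Claim_equal_rank_blocks_by_relevance_py : Prop := ∀ (tailorable : List (List (String × String))) (missing_keywords : List String) (top_n : Int), Dom_rank_blocks_by_relevance_py tailorable missing_keywords top_n → Pre_rank_blocks_by_relevance_py tailorable missing_keywords top_n → Spec_rank_blocks_by_relevance_py tailorable missing_keywords top_n (rank_blocks_by_relevance_py tailorable missing_keywords top_n)

-- ===== LEMMAS AND PROOFS =====

-- the blocks of xs whose score is s, for every s of L in order (what B's bucket pass emits)
def pvBuckets {α : Type} (f : α → Int) (L : List Int) (xs : List α) : List α :=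
  L.flatMap (fun s => xs.filter (fun b => decide (f b = s)))

theorem pvInsertBy_all_false {α : Type} (bef : α → α → Bool) (x : α) (A B : List α)
    (h : ∀ y ∈ A, bef x y = false) :
    PySem.List.insertBy bef x (A ++ B) = A ++ PySem.List.insertBy bef x B := by
  induction A with
  | nil => simp
  | cons a A ih =>
    simp only [List.cons_append, PySem.List.insertBy, h a (by simp)]
    simp only [Bool.false_eq_true, if_false, List.cons.injEq, true_and]
    exact ih (fun y hy => h y (by simp [hy]))

theorem pvInsertBy_all_true {α : Type} (bef : α → α → Bool) (x : α) (B : List α)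
    (h : ∀ y ∈ B, bef x y = true) :
    PySem.List.insertBy bef x B = x :: B := by
  cases B with
  | nil => rfl
  | cons b B => simp [PySem.List.insertBy, h b (by simp)]

theorem pvMem_buckets {α : Type} {f : α → Int} {L : List Int} {xs : List α} {y : α}
    (hy : y ∈ pvBuckets f L xs) : f y ∈ L := by
  simp only [pvBuckets, List.mem_flatMap, List.mem_filter, decide_eq_true_eq] at hy
  obtain ⟨s, hs, _, rfl⟩ := hy
  exact hs

theorem pvBuckets_append_notmem {α : Type} (f : α → Int) (L : List Int) (xs : List α) (x : α)
    (hx : f x ∉ L) : pvBuckets f L (xs ++ [x]) = pvBuckets f L xs := by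
  unfold pvBuckets
  apply List.flatMap_congr
  intro s hs
  have : ¬ (f x = s) := fun h => hx (h ▸ hs)
  simp [List.filter_append, this]

theorem pvBuckets_insert {α : Type} (f : α → Int) (L : List Int) (x : α) (xs : List α)
    (hL : L.Pairwise (· > ·)) (hx : f x ∈ L) :
    PySem.List.insertBy (fun a b => decide (f b < f a)) x (pvBuckets f L xs)
      = pvBuckets f L (xs ++ [x]) := by
  induction L generalizing xs with
  | nil => cases hx
  | cons s L ih =>
    have hs : ∀ t ∈ L, s > t := fun t ht => List.rel_of_pairwise_cons hL ht
    have hL' : L.Pairwise (· > ·) := hL.of_cons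
    have hsplit : ∀ zs, pvBuckets f (s :: L) zs
        = zs.filter (fun b => decide (f b = s)) ++ pvBuckets f L zs := by
      intro zs; simp [pvBuckets]
    by_cases hfx : f x = s
    · -- x belongs to the head bucket: it goes after its bucket, before all lower ones
      have hnot : f x ∉ L := by
        intro h; have := hs _ h; omega
      calc PySem.List.insertBy (fun a b => decide (f b < f a)) x (pvBuckets f (s :: L) xs)
          = xs.filter (fun b => decide (f b = s))
              ++ PySem.List.insertBy (fun a b => decide (f b < f a)) x (pvBuckets f L xs) := by
            rw [hsplit]
            apply pvInsertBy_all_false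
            intro y hy
            simp only [List.mem_filter, decide_eq_true_eq] at hy
            simp [hy.2, hfx]
        _ = xs.filter (fun b => decide (f b = s)) ++ (x :: pvBuckets f L xs) := by
            congr 1
            apply pvInsertBy_all_true
            intro y hy
            have h1 := pvMem_buckets hy
            have h2 := hs _ h1
            simp only [decide_eq_true_eq]; omega
        _ = pvBuckets f (s :: L) (xs ++ [x]) := by
            rw [hsplit, pvBuckets_append_notmem f L xs x hnot, List.filter_append]
            simp [hfx]
    · have hxL : f x ∈ L := by cases hx with
        | head => exact absurd rfl hfx
        | tail _ h => exact h
      have hlt : f x < s := hs _ hxL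
      calc PySem.List.insertBy (fun a b => decide (f b < f a)) x (pvBuckets f (s :: L) xs)
          = xs.filter (fun b => decide (f b = s))
              ++ PySem.List.insertBy (fun a b => decide (f b < f a)) x (pvBuckets f L xs) := by
            rw [hsplit]
            apply pvInsertBy_all_false
            intro y hy
            simp only [List.mem_filter, decide_eq_true_eq] at hy
            simp only [decide_eq_false_iff_not, not_lt]
            omega
        _ = xs.filter (fun b => decide (f b = s)) ++ pvBuckets f L (xs ++ [x]) := by
            rw [ih xs hL' hxL]
        _ = pvBuckets f (s :: L) (xs ++ [x]) := by
            rw [hsplit, List.filter_append]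
            simp [hfx]

theorem pvFoldl_insertBy_buckets {α : Type} (f : α → Int) (L : List Int) (xs : List α)
    (hL : L.Pairwise (· > ·)) (hmem : ∀ x ∈ xs, f x ∈ L) :
    xs.foldl (fun acc x => PySem.List.insertBy (fun a b => decide (f b < f a)) x acc) []
      = pvBuckets f L xs := by
  induction xs using List.reverseRecOn with
  | nil => simp [pvBuckets]
  | append_singleton ys x ih =>
    rw [List.foldl_append]
    simp only [List.foldl_cons, List.foldl_nil]
    rw [ih (fun y hy => hmem y (by simp [hy]))]
    exact pvBuckets_insert f L x ys hL (hmem x (by simp))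

-- insertion sort on (score, block) pairs keyed by fst is the map of insertion sort on blocks keyed by score
theorem pvInsertBy_map_pair {α : Type} (f : α → Int) (x : α) (ys : List α) :
    PySem.List.insertBy (fun a b : Int × α => decide (b.1 < a.1)) (f x, x)
        (ys.map (fun b => (f b, b)))
      = (PySem.List.insertBy (fun a b => decide (f b < f a)) x ys).map (fun b => (f b, b)) := by
  induction ys with
  | nil => rfl
  | cons y ys ih =>
    simp only [List.map_cons, PySem.List.insertBy]
    by_cases h : f y < f x
    · simp [h]
    · simp [h, ih]

theorem pvFoldl_map_pair {α : Type} (f : α → Int) (xs ys : List α) :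
    xs.foldl
        (fun acc x => PySem.List.insertBy (fun a b : Int × α => decide (b.1 < a.1)) (f x, x) acc)
        (ys.map (fun b => (f b, b)))
      = (xs.foldl (fun acc x => PySem.List.insertBy (fun a b => decide (f b < f a)) x acc) ys).map
          (fun b => (f b, b)) := by
  induction xs generalizing ys with
  | nil => rfl
  | cons x xs ih =>
    simp only [List.foldl_cons]
    rw [pvInsertBy_map_pair f x ys]
    exact ih (PySem.List.insertBy (fun a b => decide (f b < f a)) x ys)

theorem pvSlice_map {α β : Type} (g : α → β) (xs : List α) (b : Int) :
    PySem.List.slice (xs.map g) none (some b) = (PySem.List.slice xs none (some b)).map g := by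
  simp [PySem.List.slice, List.map_take]

-- B's bucket dict: bucket s holds exactly the blocks of score s, in order
theorem pvFoldB_getD {α : Type} (f : α → Int) (xs : List α)
    (d : PySem.Dict Int (List α)) (m : Int) (s : Int) :
    ((xs.foldl
        (fun (p : PySem.Dict Int (List α) × Int) block =>
          (p.1.insert (f block) ((p.1.getD (f block) []) ++ [block]),
           if f block > p.2 then f block else p.2))
        (d, m)).1).getD s []
      = d.getD s [] ++ xs.filter (fun b => decide (f b = s)) := by
  induction xs generalizing d m with
  | nil => simp
  | cons x xs ih =>
    simp only [List.foldl_cons]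
    rw [ih]
    by_cases h : f x = s
    · subst h
      simp [PySem.Dict.getD, PySem.Dict.get?_insert_self]
    · have : s ≠ f x := fun hh => h hh.symm
      simp [PySem.Dict.getD, PySem.Dict.get?_insert_of_ne _ _ this, h]

theorem pvFoldB_max_le {α : Type} (f : α → Int) (xs : List α)
    (d : PySem.Dict Int (List α)) (m : Int) :
    m ≤ (xs.foldl
        (fun (p : PySem.Dict Int (List α) × Int) block =>
          (p.1.insert (f block) ((p.1.getD (f block) []) ++ [block]),
           if f block > p.2 then f block else p.2))
        (d, m)).2 := by
  induction xs generalizing d m with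
  | nil => simp
  | cons x xs ih =>
    simp only [List.foldl_cons]
    refine le_trans ?_ (ih _ _)
    split <;> omega

theorem pvFoldB_max_ge {α : Type} (f : α → Int) (xs : List α)
    (d : PySem.Dict Int (List α)) (m : Int) :
    ∀ b ∈ xs, f b ≤ (xs.foldl
        (fun (p : PySem.Dict Int (List α) × Int) block =>
          (p.1.insert (f block) ((p.1.getD (f block) []) ++ [block]),
           if f block > p.2 then f block else p.2))
        (d, m)).2 := by
  induction xs generalizing d m with
  | nil => intro b hb; cases hb
  | cons x xs ih =>
    intro b hb
    simp only [List.foldl_cons]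
    cases hb with
    | head =>
      refine le_trans ?_ (pvFoldB_max_le f xs _ _)
      split <;> omega
    | tail _ h => exact ih _ _ b h

theorem pvScore_nonneg (mt : PySem.Set String) (b : List (String × String)) :
    0 ≤ pvScore mt b := by
  unfold pvScore PySem.Set.len
  positivity

theorem pvPairwise_gt_pyRange_neg_one (a b : Int) :
    (PySem.List.pyRange a b (-1)).Pairwise (· > ·) := by
  rw [PySem.List.pyRange_neg_one_eq_reverse]
  rw [List.pairwise_reverse]
  exact PySem.List.pairwise_lt_pyRange_one _ _

-- ===== VERDICT (by name: the statement is the Claim_ definition above) =====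
theorem rank_blocks_by_relevance_py_spec : Claim_equal_rank_blocks_by_relevance_py := by
  intro tailorable missing_keywords top_n _ _
  unfold Spec_rank_blocks_by_relevance_py
  unfold rank_blocks_by_relevance_py rank_blocks_by_relevance_py_alt
  by_cases hmk : missing_keywords = []
  · simp [hmk]
  · simp only [hmk, if_false]
    set mt := pvMissingTokens missing_keywords with hmt
    set f : List (String × String) → Int := pvScore mt with hf
    set bm := tailorable.foldl
        (fun (p : PySem.Dict Int (List (List (String × String))) × Int) block =>
          (p.1.insert (f block) ((p.1.getD (f block) []) ++ [block]),
           if f block > p.2 then f block else p.2))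
        (PySem.Dict.mk [], 0) with hbm
    set L := PySem.List.pyRange bm.2 (-1) (-1) with hL
    have hLpw : L.Pairwise (· > ·) := pvPairwise_gt_pyRange_neg_one _ _
    have hmem : ∀ x ∈ tailorable, f x ∈ L := by
      intro x hx
      rw [hL, PySem.List.mem_pyRange_neg_one]
      constructor
      · have h0 : 0 ≤ f x := pvScore_nonneg mt x; omega
      · exact pvFoldB_max_ge f tailorable _ 0 x hx
    -- A side
    have hscored : tailorable.foldl
        (fun acc block => acc ++ [(f block, block)]) ([] : List (Int × List (String × String)))
        = tailorable.map (fun b => (f b, b)) := by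
      rw [PySem.List.foldl_append_singleton_eq_map]
      simp
    rw [hscored, PySem.List.sorted_rev_eq_foldl_insertBy, List.foldl_map]
    rw [show (([] : List (Int × List (String × String))))
        = ([] : List (List (String × String))).map (fun b => (f b, b)) from rfl]
    rw [pvFoldl_map_pair f tailorable []]
    rw [pvFoldl_insertBy_buckets f L tailorable hLpw hmem]
    -- B side
    have hbuckets : (L.foldl (fun acc s => acc ++ bm.1.getD s []) []) = pvBuckets f L tailorable := by
      rw [PySem.List.foldl_append_eq_flatMap]
      simp only [List.nil_append]
      unfold pvBuckets
      apply List.flatMap_congr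
      intro s _
      have := pvFoldB_getD f tailorable (PySem.Dict.mk []) 0 s
      rw [← hbm] at this
      rw [this]
      simp [PySem.Dict.getD, PySem.Dict.get?]
    rw [hbuckets, pvSlice_map]
    rw [List.map_map]
    have hid : ((fun x : Int × List (String × String) => x.2) ∘ fun b => (f b, b)) = id := rfl
    rw [hid, List.map_id]
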